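-- pv_equiv track=rewrite | github.com/Mr-MeerMoazzam/dynamic-langgraph-ai-supervisor-agent | src/core/agents/subagent.py | _suggest_relevant_files
-- ===== SOURCE A (Python) =====
-- from typing import Dict, List, Any, Optional, Tuple
--
-- def _suggest_relevant_files(task_description: str, available_files: set) -> List[str]:
--     """Suggest which existing files might be relevant to the task"""
--     task_lower = task_description.lower()
--     suggestions = []
--
--     # Keyword mapping
--     keywords_map = {
--         'market': ['market', 'research'],
--         'catalog': ['catalog', 'product'],
--         'price': ['price', 'discount', 'cost'],
--         'report': ['report', 'summary', 'final'],
--         'discount': ['discount', 'price'],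
--         'data': ['data', 'csv'],
--     }
--
--     # Find relevant files based on keywords
--     for filepath in available_files:
--         filepath_lower = filepath.lower()
--
--         # Check if any keyword from task appears in filename
--         for keyword_group in keywords_map.values():
--             if any(keyword in task_lower for keyword in keyword_group):
--                 if any(keyword in filepath_lower for keyword in keyword_group):
--                     if filepath not in suggestions:
--                         suggestions.append(filepath)
--                         break
--
--     return suggestions
-- ===== SOURCE B (Python) =====
-- from typing import List
--
-- def _suggest_relevant_files(task_description: str, available_files: set) -> List[str]:
--     """Suggest which existing files might be relevant to the task"""
--     task_lower = task_description.lower()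
--
--     keywords_map = {
--         'market': ['market', 'research'],
--         'catalog': ['catalog', 'product'],
--         'price': ['price', 'discount', 'cost'],
--         'report': ['report', 'summary', 'final'],
--         'discount': ['discount', 'price'],
--         'data': ['data', 'csv'],
--     }
--
--     # Index pass: union of all keyword groups that match the task description.
--     active_keywords = set()
--     for group in keywords_map.values():
--         if any(kw in task_lower for kw in group):
--             active_keywords.update(group)
--
--     # Single membership pass over the files.
--     return [f for f in available_files
--             if any(kw in f.lower() for kw in active_keywords)]
-- ===== Notes on version B (the rewrite author's own statement) =====
-- stated objective: faster
-- what changed: B hoists the task-description keyword scan out of the per-file loop: one pass over the keyword map builds the active-keyword set, then a single comprehension keeps files containing any active keyword, so the task string is scanned once instead of once per file per group.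
import Mathlib
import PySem

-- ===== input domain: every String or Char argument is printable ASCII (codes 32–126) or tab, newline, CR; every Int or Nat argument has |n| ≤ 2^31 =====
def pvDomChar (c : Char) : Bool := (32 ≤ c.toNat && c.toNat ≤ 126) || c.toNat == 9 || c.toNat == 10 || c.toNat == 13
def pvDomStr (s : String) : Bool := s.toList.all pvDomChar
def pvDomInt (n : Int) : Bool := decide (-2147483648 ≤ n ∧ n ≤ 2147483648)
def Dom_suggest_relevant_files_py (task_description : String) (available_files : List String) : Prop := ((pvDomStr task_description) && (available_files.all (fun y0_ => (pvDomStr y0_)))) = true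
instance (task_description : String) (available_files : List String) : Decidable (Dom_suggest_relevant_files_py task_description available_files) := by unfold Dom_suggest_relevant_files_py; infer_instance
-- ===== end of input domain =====

-- B replaces A's per-file rescanning of the task against every keyword group by one index pass
-- building the set of active keywords, then a single filter over the files (objective: simpler).

-- ===== PORT A =====
-- the literal keywords_map of A (dict values in insertion order)
def pvKeywordsMapA : List (String × List String) :=
  [("market", ["market", "research"]),
   ("catalog", ["catalog", "product"]),
   ("price", ["price", "discount", "cost"]),
   ("report", ["report", "summary", "final"]),
   ("discount", ["discount", "price"]),
   ("data", ["data", "csv"])]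

-- inner 'for keyword_group in keywords_map.values()' loop with its break
def pvGroupLoopA (task_lower filepath_lower filepath : String) (sugg : List String) :
    List (List String) → List String
  | [] => sugg
  | g :: gs =>
    if g.any (fun kw => PySem.Str.isIn kw task_lower) then
      if g.any (fun kw => PySem.Str.isIn kw filepath_lower) then
        if sugg.contains filepath then pvGroupLoopA task_lower filepath_lower filepath sugg gs
        else sugg ++ [filepath]   -- append + break
      else pvGroupLoopA task_lower filepath_lower filepath sugg gs
    else pvGroupLoopA task_lower filepath_lower filepath sugg gs

def suggest_relevant_files_py (task_description : String) (available_files : List String) : List String :=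
  let task_lower := PySem.Str.lower task_description
  available_files.foldl
    (fun sugg filepath =>
      pvGroupLoopA task_lower (PySem.Str.lower filepath) filepath sugg (pvKeywordsMapA.map Prod.snd))
    []

-- ===== PORT B =====
def pvKeywordsMapB : List (String × List String) :=
  [("market", ["market", "research"]),
   ("catalog", ["catalog", "product"]),
   ("price", ["price", "discount", "cost"]),
   ("report", ["report", "summary", "final"]),
   ("discount", ["discount", "price"]),
   ("data", ["data", "csv"])]

def suggest_relevant_files_py_alt (task_description : String) (available_files : List String) : List String :=
  let task_lower := PySem.Str.lower task_description
  let active : PySem.Set String :=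
    (pvKeywordsMapB.map Prod.snd).foldl
      (fun acc g =>
        if g.any (fun kw => PySem.Str.isIn kw task_lower) then PySem.Set.update acc g else acc)
      PySem.Set.empty
  available_files.filter (fun f => active.any (fun kw => PySem.Str.isIn kw (PySem.Str.lower f)))

-- ===== PRECONDITION & SPEC =====
-- Pre_ excludes lists with duplicate filepaths, which the Python set parameter cannot represent and
-- on which A's 'filepath not in suggestions' dedup is an artefact; B lists every occurrence there.
def Pre_suggest_relevant_files_py (task_description : String) (available_files : List String) : Prop :=
  available_files.Nodup
instance (task_description : String) (available_files : List String) : Decidable (Pre_suggest_relevant_files_py task_description available_files) := by unfold Pre_suggest_relevant_files_py; infer_instance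

def pvWitness_suggest_relevant_files_py : String × List String :=
  ("Market research on pricing", ["market_data.csv", "notes.txt"])

def Spec_suggest_relevant_files_py (task_description : String) (available_files : List String) (out : List String) : Prop := out = suggest_relevant_files_py_alt task_description available_files
instance (task_description : String) (available_files : List String) (out : List String) : Decidable (Spec_suggest_relevant_files_py task_description available_files out) := by unfold Spec_suggest_relevant_files_py; infer_instance

-- ===== CLAIM (what is proved, stated in full; the proofs are below) =====
def Claim_equal_suggest_relevant_files_py : Prop := ∀ (task_description : String) (available_files : List String), Dom_suggest_relevant_files_py task_description available_files → Pre_suggest_relevant_files_py task_description available_files → Spec_suggest_relevant_files_py task_description available_files (suggest_relevant_files_py task_description available_files)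

-- ===== LEMMAS AND PROOFS =====

-- the per-file relevance test used by B (abbreviation for the proofs)
def pvTaskHit (task_lower : String) (g : List String) : Bool :=
  g.any (fun kw => PySem.Str.isIn kw task_lower)

def pvActive (task_lower : String) : PySem.Set String :=
  (pvKeywordsMapB.map Prod.snd).foldl
    (fun acc g => if pvTaskHit task_lower g then PySem.Set.update acc g else acc)
    PySem.Set.empty

lemma mem_active_fold (task_lower : String) (gs : List (List String)) (acc : PySem.Set String)
    (x : String) :
    x ∈ gs.foldl (fun acc g => if pvTaskHit task_lower g then PySem.Set.update acc g else acc) acc ↔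
      x ∈ acc ∨ ∃ g ∈ gs, pvTaskHit task_lower g = true ∧ x ∈ g := by
  induction gs generalizing acc with
  | nil => simp
  | cons g gs ih =>
    simp only [List.foldl_cons, ih]
    by_cases h : pvTaskHit task_lower g = true
    · simp only [if_pos h, PySem.Set.mem_update, List.exists_mem_cons_iff]
      tauto
    · simp only [if_neg h, List.exists_mem_cons_iff]
      tauto

-- B's filter condition equals A's "some group hits both task and file" condition
lemma cond_eq (task_lower f : String) :
    (pvActive task_lower).any (fun kw => PySem.Str.isIn kw (PySem.Str.lower f)) =
      (pvKeywordsMapA.map Prod.snd).any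
        (fun g => pvTaskHit task_lower g && g.any (fun kw => PySem.Str.isIn kw (PySem.Str.lower f))) := by
  rw [Bool.eq_iff_iff]
  simp only [List.any_eq_true, pvActive, mem_active_fold, Bool.and_eq_true]
  constructor
  · rintro ⟨kw, (h | ⟨g, hg, hhit, hkw⟩), hin⟩
    · simp [PySem.Set.empty] at h
    · exact ⟨g, hg, hhit, kw, hkw, hin⟩
  · rintro ⟨g, hg, hhit, kw, hkw, hin⟩
    exact ⟨kw, Or.inr ⟨g, hg, hhit, hkw⟩, hin⟩

-- A's inner group loop, characterised when the file is not yet suggested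
lemma groupLoopA_eq (task_lower fl f : String) (sugg : List String) (gs : List (List String))
    (hf : f ∉ sugg) :
    pvGroupLoopA task_lower fl f sugg gs =
      if gs.any (fun g => pvTaskHit task_lower g && g.any (fun kw => PySem.Str.isIn kw fl)) then
        sugg ++ [f]
      else sugg := by
  induction gs with
  | nil => simp [pvGroupLoopA]
  | cons g gs ih =>
    have hc : sugg.contains f = false := by
      simp [List.contains_eq_mem, hf]
    unfold pvGroupLoopA
    cases h1 : g.any (fun kw => PySem.Str.isIn kw task_lower) <;>
      cases h2 : g.any (fun kw => PySem.Str.isIn kw fl) <;>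
        simp only [pvTaskHit, h1, h2, hc, ih, List.any_cons, Bool.false_and, Bool.true_and,
          Bool.false_or, Bool.true_or, Bool.false_eq_true, if_false, if_true] <;> rfl

-- A's fold over the files accumulates exactly B's filter
lemma foldA_eq (task_lower : String) (files sugg : List String)
    (hnd : files.Nodup) (hdisj : ∀ f ∈ files, f ∉ sugg) :
    files.foldl
        (fun sugg f => pvGroupLoopA task_lower (PySem.Str.lower f) f sugg (pvKeywordsMapA.map Prod.snd))
        sugg =
      sugg ++ files.filter
        (fun f => (pvActive task_lower).any (fun kw => PySem.Str.isIn kw (PySem.Str.lower f))) := by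
  induction files generalizing sugg with
  | nil => simp
  | cons f fs ih =>
    have hnd' := hnd
    simp only [List.nodup_cons] at hnd'
    have hstep := groupLoopA_eq task_lower (PySem.Str.lower f) f sugg
      (pvKeywordsMapA.map Prod.snd) (hdisj f (by simp))
    rw [← cond_eq task_lower f] at hstep
    simp only [List.foldl_cons, hstep, List.filter_cons]
    by_cases hcond :
        (pvActive task_lower).any (fun kw => PySem.Str.isIn kw (PySem.Str.lower f)) = true
    · rw [if_pos hcond, if_pos hcond,
        ih (sugg ++ [f]) hnd'.2
          (by
            intro g hg
            simp only [List.mem_append, List.mem_singleton]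
            rintro (h | rfl)
            · exact hdisj g (by simp [hg]) h
            · exact hnd'.1 hg)]
      simp
    · rw [if_neg hcond, if_neg hcond, ih sugg hnd'.2 (fun g hg => hdisj g (by simp [hg]))]

-- ===== VERDICT (by name: the statement is the Claim_ definition above) =====
theorem suggest_relevant_files_py_spec : Claim_equal_suggest_relevant_files_py := by
  intro task files _ hpre
  unfold Spec_suggest_relevant_files_py suggest_relevant_files_py suggest_relevant_files_py_alt
  simp only []
  rw [foldA_eq (PySem.Str.lower task) files [] hpre (by simp)]
  simp only [pvActive, pvTaskHit, List.nil_append]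
  rfl
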